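-- pv_equiv track=rewrite | github.com/ademyanchuk/toksmith | src/toksmith/tokenizer.py | get_lowest_rank_pair
-- ===== SOURCE A (Python) =====
-- from typing import Optional, Sequence, Tuple, TypeVar
--
-- def get_lowest_rank_pair(
--   pretoken: tuple[int, ...],
--   pair_to_idx: dict[tuple[int, int], int],
-- ) -> Optional[tuple[tuple[int, int], int]]:
--   """Scans pretoken for the pair which exist in `pair_to_idx`
--   and has lowest index, if none found returns None
--
--   Args:
--       pretoken (tuple[int]): sequence of integers
--       pair_to_idx (dict[tuple[int, int], int]): map of the pair to index
--       (it is merges converted to dict)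
--
--   Returns:
--       Optional[tuple[tuple[int, int], int]]: lowest rank (pair, ix) or None
--   """
--   result = None
--   for pair in zip(pretoken, pretoken[1:]):
--     ix = pair_to_idx.get(pair)
--     if ix is not None:
--       if result is None or result[1] > ix:
--         result = (pair, ix)
--   return result
-- ===== SOURCE B (Python) =====
-- def get_lowest_rank_pair(pretoken, pair_to_idx):
--   """Rank-order scan: walk the rank table in ascending index order and
--   return the first entry whose pair actually occurs adjacently in pretoken."""
--   present = set(zip(pretoken, pretoken[1:]))
--   for pair, ix in sorted(pair_to_idx.items(), key=lambda kv: kv[1]):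
--     if pair in present:
--       return (pair, ix)
--   return None
-- ===== Notes on version B (the rewrite author's own statement) =====
-- stated objective: alternative
-- what changed: Instead of scanning the pretoken's adjacent pairs while tracking a running minimum index, B builds the set of adjacent pairs once and walks the rank table in ascending index order, returning the first entry whose pair is present.
-- outside the precondition, e.g. on get_lowest_rank_pair((1, 2, 3), {(2, 3): 0, (1, 2): 0}): A returns ((1, 2), 0), B returns ((2, 3), 0)
import Mathlib
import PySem

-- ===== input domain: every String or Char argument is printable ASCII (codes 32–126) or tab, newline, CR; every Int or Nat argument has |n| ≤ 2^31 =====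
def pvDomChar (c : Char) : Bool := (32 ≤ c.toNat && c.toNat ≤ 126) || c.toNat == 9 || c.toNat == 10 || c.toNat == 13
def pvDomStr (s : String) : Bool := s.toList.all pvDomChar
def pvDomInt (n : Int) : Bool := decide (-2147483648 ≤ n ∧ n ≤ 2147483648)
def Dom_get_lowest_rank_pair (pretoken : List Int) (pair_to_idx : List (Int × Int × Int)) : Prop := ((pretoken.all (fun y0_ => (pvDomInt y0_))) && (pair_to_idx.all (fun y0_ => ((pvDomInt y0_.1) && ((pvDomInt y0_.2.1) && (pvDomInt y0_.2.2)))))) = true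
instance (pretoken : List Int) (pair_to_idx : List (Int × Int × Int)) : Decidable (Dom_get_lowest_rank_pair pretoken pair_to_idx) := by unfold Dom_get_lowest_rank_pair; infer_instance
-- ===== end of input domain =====

-- B replaces A's running-minimum scan of the adjacent pairs by a scan of the rank table in
-- ascending-index order against the set of adjacent pairs (alternative decomposition).

-- ===== PORT A =====
-- the body of A's for-loop, as a fold step
def stepA (d : PySem.Dict (Int × Int) Int) (result : Option ((Int × Int) × Int))
    (pair : Int × Int) : Option ((Int × Int) × Int) :=
  match d.get? pair with
  | none => result
  | some ix =>
    match result with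
    | none => some (pair, ix)
    | some r => if r.2 > ix then some (pair, ix) else some r

def get_lowest_rank_pair (pretoken : List Int) (pair_to_idx : List (Int × Int × Int)) :
    Option ((Int × Int) × Int) :=
  (pretoken.zip (PySem.List.slice pretoken (some 1) none)).foldl
    (stepA (PySem.Dict.mk (pair_to_idx.map (fun e => ((e.1, e.2.1), e.2.2))))) none

-- ===== PORT B =====
def get_lowest_rank_pair_alt (pretoken : List Int) (pair_to_idx : List (Int × Int × Int)) :
    Option ((Int × Int) × Int) :=
  let present := PySem.Set.ofList (pretoken.zip (PySem.List.slice pretoken (some 1) none))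
  (PySem.List.sorted
      (PySem.Dict.mk (pair_to_idx.map (fun e => ((e.1, e.2.1), e.2.2)))).items
      (fun kv => kv.2)).find? (fun kv => present.contains kv.1)

-- ===== PRECONDITION & SPEC =====
-- Pre_ excludes association lists with a duplicated pair key (a Python dict cannot hold one,
-- so such a list represents no dict input) and those assigning the same rank index to two
-- pairs, where A's pretoken-order tie-break and B's insertion-order tie-break are equally
-- defensible choices on an unspecified corner.
def Pre_get_lowest_rank_pair (pretoken : List Int) (pair_to_idx : List (Int × Int × Int)) : Prop :=
  (pair_to_idx.map (fun e => (e.1, e.2.1))).Nodup ∧ (pair_to_idx.map (fun e => e.2.2)).Nodup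
instance (pretoken : List Int) (pair_to_idx : List (Int × Int × Int)) : Decidable (Pre_get_lowest_rank_pair pretoken pair_to_idx) := by unfold Pre_get_lowest_rank_pair; infer_instance

def pvWitness_get_lowest_rank_pair : List Int × (List (Int × Int × Int)) :=
  ([1, 2, 3], [(1, 2, 7), (2, 3, 4)])

def Spec_get_lowest_rank_pair (pretoken : List Int) (pair_to_idx : List (Int × Int × Int)) (out : Option ((Int × Int) × Int)) : Prop := out = get_lowest_rank_pair_alt pretoken pair_to_idx
instance (pretoken : List Int) (pair_to_idx : List (Int × Int × Int)) (out : Option ((Int × Int) × Int)) : Decidable (Spec_get_lowest_rank_pair pretoken pair_to_idx out) := by unfold Spec_get_lowest_rank_pair; infer_instance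

-- ===== CLAIM (what is proved, stated in full; the proofs are below) =====
def Claim_equal_get_lowest_rank_pair : Prop := ∀ (pretoken : List Int) (pair_to_idx : List (Int × Int × Int)), Dom_get_lowest_rank_pair pretoken pair_to_idx → Pre_get_lowest_rank_pair pretoken pair_to_idx → Spec_get_lowest_rank_pair pretoken pair_to_idx (get_lowest_rank_pair pretoken pair_to_idx)

-- ===== LEMMAS AND PROOFS =====

-- o is "the first pair of zs carrying the (strictly) least index in d, with that index"
def GoodMin (zs : List (Int × Int)) (d : PySem.Dict (Int × Int) Int)
    (o : Option ((Int × Int) × Int)) : Prop :=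
  match o with
  | none => ∀ p ∈ zs, d.get? p = none
  | some r => d.get? r.1 = some r.2 ∧ r.1 ∈ zs ∧ ∀ q ∈ zs, ∀ j, d.get? q = some j → r.2 ≤ j

theorem goodmin_step (zs : List (Int × Int)) (d : PySem.Dict (Int × Int) Int)
    (o : Option ((Int × Int) × Int)) (p : Int × Int) (h : GoodMin zs d o) :
    GoodMin (zs ++ [p]) d (stepA d o p) := by
  rcases hp : d.get? p with _ | ix <;> rcases o with _ | r <;>
    simp only [GoodMin, stepA, hp] at h ⊢
  · intro q hq
    rcases List.mem_append.mp hq with hq | hq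
    · exact h q hq
    · simp only [List.mem_singleton] at hq; simpa [hq] using hp
  · refine ⟨h.1, List.mem_append_left _ h.2.1, ?_⟩
    intro q hq j hj
    rcases List.mem_append.mp hq with hq | hq
    · exact h.2.2 q hq j hj
    · simp only [List.mem_singleton] at hq; rw [hq, hp] at hj; cases hj
  · refine ⟨by simp, List.mem_append_right _ (List.mem_singleton.mpr rfl), ?_⟩
    intro q hq j hj
    rcases List.mem_append.mp hq with hq | hq
    · rw [h q hq] at hj; cases hj
    · simp only [List.mem_singleton] at hq; rw [hq, hp] at hj
      exact le_of_eq (Option.some.inj hj)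
  · by_cases hlt : r.2 > ix
    · rw [if_pos hlt]
      refine ⟨by simp [hp], List.mem_append_right _ (List.mem_singleton.mpr rfl), ?_⟩
      intro q hq j hj
      rcases List.mem_append.mp hq with hq | hq
      · exact le_trans (le_of_lt hlt) (h.2.2 q hq j hj)
      · simp only [List.mem_singleton] at hq; rw [hq, hp] at hj
        exact le_of_eq (Option.some.inj hj)
    · rw [if_neg hlt]
      refine ⟨h.1, List.mem_append_left _ h.2.1, ?_⟩
      intro q hq j hj
      rcases List.mem_append.mp hq with hq | hq
      · exact h.2.2 q hq j hj
      · simp only [List.mem_singleton] at hq; rw [hq, hp] at hj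
        rw [← Option.some.inj hj]; omega

theorem goodmin_foldA (zs : List (Int × Int)) (d : PySem.Dict (Int × Int) Int) :
    GoodMin zs d (zs.foldl (stepA d) none) := by
  induction zs using List.reverseRecOn with
  | nil => intro p hp; cases hp
  | append_singleton ys p ih =>
      rw [List.foldl_append]
      exact goodmin_step ys d _ p ih

theorem set_contains_ofList (zs : List (Int × Int)) (p : Int × Int) :
    (PySem.Set.ofList zs).contains p = true ↔ p ∈ zs := by
  have h1 : (PySem.Set.ofList zs).contains p = true ↔ p ∈ PySem.Set.ofList zs := by
    simp [PySem.Set.contains]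
  rw [h1]; exact PySem.Set.mem_ofList zs p

theorem find?_sorted_min (l : List ((Int × Int) × Int)) (pred : (Int × Int) × Int → Bool)
    (e : (Int × Int) × Int) (hp : l.Pairwise (fun a b => a.2 ≤ b.2))
    (he : l.find? pred = some e) : ∀ f ∈ l, pred f = true → e.2 ≤ f.2 := by
  induction l with
  | nil => cases he
  | cons x t ih =>
      intro f hf hpf
      rcases List.pairwise_cons.mp hp with ⟨hx, ht⟩
      by_cases hpx : pred x = true
      · rw [List.find?_cons_of_pos hpx] at he
        rcases List.mem_cons.mp hf with hf | hf
        · rw [← Option.some.inj he, hf]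
        · rw [← Option.some.inj he]; exact hx f hf
      · rw [List.find?_cons_of_neg hpx] at he
        rcases List.mem_cons.mp hf with hf | hf
        · rw [hf] at hpf; exact absurd hpf hpx
        · exact ih ht he f hf hpf

theorem goodmin_findB (zs : List (Int × Int)) (d : PySem.Dict (Int × Int) Int)
    (hk : d.keys.Nodup) :
    GoodMin zs d ((PySem.List.sorted d.items (fun kv => kv.2)).find?
      (fun kv => (PySem.Set.ofList zs).contains kv.1)) := by
  rcases hfind : (PySem.List.sorted d.items (fun kv => kv.2)).find?
      (fun kv => (PySem.Set.ofList zs).contains kv.1) with _ | e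
  · rw [hfind]; simp only [GoodMin]
    intro p hpz
    rcases hget : d.get? p with _ | j
    · rfl
    · exfalso
      have hmem : (p, j) ∈ PySem.List.sorted d.items (fun kv => kv.2) :=
        (PySem.List.mem_sorted _ _ _ _).mpr (PySem.Dict.mem_items_of_get?_eq_some d hget)
      have := List.find?_eq_none.mp hfind _ hmem
      exact this (by simpa using (set_contains_ofList zs p).mpr hpz)
  · rw [hfind]; simp only [GoodMin]
    have hmem : e ∈ d.items :=
      (PySem.List.mem_sorted _ _ _ _).mp (List.mem_of_find?_eq_some hfind)
    have hpred : (PySem.Set.ofList zs).contains e.1 = true := by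
      simpa using List.find?_some hfind
    refine ⟨PySem.Dict.get?_of_mem_items d (by simpa using hmem) hk,
      (set_contains_ofList zs e.1).mp hpred, ?_⟩
    intro q hq j hj
    have hqmem : (q, j) ∈ PySem.List.sorted d.items (fun kv => kv.2) :=
      (PySem.List.mem_sorted _ _ _ _).mpr (PySem.Dict.mem_items_of_get?_eq_some d hj)
    exact find?_sorted_min _ _ e (PySem.List.sorted_pairwise d.items (fun kv => kv.2))
      hfind (q, j) hqmem (by simpa using (set_contains_ofList zs q).mpr hq)

theorem goodmin_unique (zs : List (Int × Int)) (d : PySem.Dict (Int × Int) Int)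
    (hv : (d.items.map (fun kv => kv.2)).Nodup)
    (o₁ o₂ : Option ((Int × Int) × Int))
    (h₁ : GoodMin zs d o₁) (h₂ : GoodMin zs d o₂) : o₁ = o₂ := by
  rcases o₁ with _ | r <;> rcases o₂ with _ | s <;> simp only [GoodMin] at h₁ h₂
  · rfl
  · rw [h₁ s.1 h₂.2.1] at h₂; cases h₂.1
  · rw [h₂ r.1 h₁.2.1] at h₁; cases h₁.1
  · have hrs : r.2 = s.2 :=
      le_antisymm (h₁.2.2 s.1 h₂.2.1 s.2 h₂.1) (h₂.2.2 r.1 h₁.2.1 r.2 h₁.1)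
    have hr : (r.1, r.2) ∈ d.items := PySem.Dict.mem_items_of_get?_eq_some d h₁.1
    have hs : (s.1, s.2) ∈ d.items := PySem.Dict.mem_items_of_get?_eq_some d h₂.1
    have : (r.1, r.2) = (s.1, s.2) := List.inj_on_of_nodup_map hv hr hs (by simpa using hrs)
    simpa using this

-- ===== VERDICT (by name: the statement is the Claim_ definition above) =====
theorem get_lowest_rank_pair_spec : Claim_equal_get_lowest_rank_pair := by
  intro pretoken pair_to_idx _ hpre
  unfold Spec_get_lowest_rank_pair get_lowest_rank_pair get_lowest_rank_pair_alt
  set d := PySem.Dict.mk (pair_to_idx.map (fun e => ((e.1, e.2.1), e.2.2))) with hd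
  set zs := pretoken.zip (PySem.List.slice pretoken (some 1) none) with hzs
  have hk : d.keys.Nodup := by
    have := hpre.1
    simpa [hd, PySem.Dict.keys_mk, List.map_map, Function.comp] using this
  have hv : (d.items.map (fun kv => kv.2)).Nodup := by
    have := hpre.2
    simpa [hd, PySem.Dict.items, List.map_map, Function.comp] using this
  exact goodmin_unique zs d hv _ _ (goodmin_foldA zs d) (goodmin_findB zs d hk)
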